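-- pv_equiv track=rewrite | github.com/stat-thon/Coding-Test-Study-2nd | Dawny/Programmers/09TH/LV1/nearestidenticalletter.py | solution
-- ===== SOURCE A (Python) =====
-- def solution(s):
--     location = {}
--     f = []
--     for i, c in enumerate(s):
--         if c in location:
--             f.append(i - location[c])
--             location.update({c:i})
--         else:
--             location.setdefault(c, i)
--             f.append(-1)
--     return f
-- ===== SOURCE B (Python) =====
-- def solution(s):
--     f = []
--     for i, c in enumerate(s):
--         j = i - 1
--         while j >= 0 and s[j] != c:
--             j -= 1
--         f.append(i - j if j >= 0 else -1)
--     return f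
-- ===== Notes on version B (the rewrite author's own statement) =====
-- stated objective: simpler
-- what changed: Replaced the running last-seen dict with a per-index backward scan for the nearest earlier identical character, maintaining no auxiliary index structure.
import Mathlib
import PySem

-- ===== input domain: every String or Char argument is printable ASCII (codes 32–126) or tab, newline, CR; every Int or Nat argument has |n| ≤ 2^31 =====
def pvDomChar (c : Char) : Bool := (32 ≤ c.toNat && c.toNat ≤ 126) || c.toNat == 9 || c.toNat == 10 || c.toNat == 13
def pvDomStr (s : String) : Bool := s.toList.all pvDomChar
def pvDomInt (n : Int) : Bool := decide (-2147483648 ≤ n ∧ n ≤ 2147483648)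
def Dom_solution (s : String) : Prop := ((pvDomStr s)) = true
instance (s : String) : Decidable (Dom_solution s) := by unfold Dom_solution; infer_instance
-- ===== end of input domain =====

-- B replaces A's running last-seen dict with a per-index backward scan (simpler state, no index structure); equal return value on every string.

-- ===== PORT A =====
-- state: (location, f); one step of A's loop over enumerate(s)
def solutionStep (st : PySem.Dict Char Int × List Int) (ic : Int × Char) :
    PySem.Dict Char Int × List Int :=
  if st.1.contains ic.2 then
    (st.1.insert ic.2 ic.1, st.2 ++ [ic.1 - st.1.getD ic.2 0])
  else
    (st.1.setdefault ic.2 ic.1, st.2 ++ [-1])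

def solution (s : String) : List Int :=
  ((PySem.List.enumerate s.toList 0).foldl solutionStep (PySem.Dict.empty, [])).2

-- ===== PORT B =====
-- the while loop 'j = i-1; while j >= 0 and s[j] != c: j -= 1'; argument j+1 stands for current j
-- (s[j] is always in range here, so lst.getD j ' ' is exact for Python's s[j])
def backScan (l : List Char) (c : Char) : Nat → Int
  | 0 => -1
  | j + 1 => if l.getD j ' ' == c then (j : Int) else backScan l c j

def solution_alt (s : String) : List Int :=
  let l := s.toList
  (List.range l.length).map (fun i =>
    let c := l.getD i ' '
    let j := backScan l c i
    if j ≥ 0 then (i : Int) - j else -1)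

-- ===== PRECONDITION & SPEC =====
def Spec_solution (s : String) (out : List Int) : Prop := out = solution_alt s
instance (s : String) (out : List Int) : Decidable (Spec_solution s out) := by unfold Spec_solution; infer_instance

-- ===== CLAIM (what is proved, stated in full; the proofs are below) =====
def Claim_equal_solution : Prop := ∀ (s : String), Dom_solution s → Spec_solution s (solution s)

-- ===== LEMMAS AND PROOFS =====

-- backScan only reads indices < j, hence is unchanged by appending to the list
lemma backScan_append (p t : List Char) (c : Char) (j : Nat) (h : j ≤ p.length) :
    backScan (p ++ t) c j = backScan p c j := by
  induction j with
  | zero => rfl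
  | succ j ih =>
    simp only [backScan, List.getD_append _ _ _ _ (by omega : j < p.length), ih (by omega)]

lemma backScan_snoc_self (p : List Char) (a : Char) :
    backScan (p ++ [a]) a (p.length + 1) = (p.length : Int) := by
  simp [backScan]

lemma backScan_nonneg_of_found (l : List Char) (c : Char) (j : Nat)
    (h : backScan l c j ≠ -1) : 0 ≤ backScan l c j ∧ backScan l c j < (j : Int) := by
  induction j with
  | zero => simp [backScan] at h
  | succ j ih =>
    by_cases hc : l.getD j ' ' == c
    · simp only [backScan, if_pos hc]
      refine ⟨by positivity, by push_cast; omega⟩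
    · simp only [backScan, if_neg hc] at h ⊢
      have := ih h
      push_cast
      omega

-- the dict invariant: location's entry for c is the nearest earlier occurrence in p, if any
def LocInv (d : PySem.Dict Char Int) (p : List Char) : Prop :=
  ∀ c, d.get? c = if backScan p c p.length = -1 then none else some (backScan p c p.length)

lemma LocInv_step {d : PySem.Dict Char Int} {p : List Char} (h : LocInv d p) (a : Char) :
    LocInv (d.insert a (p.length : Int)) (p ++ [a]) := by
  intro c
  by_cases hca : c = a
  · subst hca
    rw [PySem.Dict.get?_insert_self]
    have hb : backScan (p ++ [c]) c ((p ++ [c]).length) = (p.length : Int) := by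
      simpa [List.length_append] using backScan_snoc_self p c
    rw [hb]
    simp
  · rw [PySem.Dict.get?_insert_of_ne _ _ hca, h c]
    have hb : backScan (p ++ [a]) c ((p ++ [a]).length) = backScan p c p.length := by
      have hlen1 : (p ++ [a]).length = p.length + 1 := by simp
      rw [hlen1]
      simp only [backScan]
      have hga : (p ++ [a]).getD p.length ' ' = a := by
        rw [List.getD_append_right _ _ _ _ (le_refl _)]; simp
      rw [hga, if_neg (by simp only [beq_iff_eq]; exact fun h' => hca h'.symm),
        backScan_append _ _ _ _ (le_refl _)]
    rw [hb]

-- one fold step produces the backward-scan element and preserves the invariant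
lemma solution_loop (t p : List Char) (d : PySem.Dict Char Int) (acc : List Int)
    (hinv : LocInv d p) :
    ((PySem.List.enumerate t (p.length : Int)).foldl solutionStep (d, acc)).2
      = acc ++ (List.range' p.length t.length).map (fun i =>
          let c := (p ++ t).getD i ' '
          let j := backScan (p ++ t) c i
          if j ≥ 0 then (i : Int) - j else -1) := by
  induction t generalizing p d acc with
  | nil => simp [PySem.List.enumerate_nil]
  | cons a t ih =>
    rw [PySem.List.enumerate_cons, List.foldl_cons]
    have hc : (p ++ a :: t).getD p.length ' ' = a := by
      rw [List.getD_append_right _ _ _ _ (le_refl _)]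
      simp [List.getD]
    have hbs : backScan (p ++ a :: t) a p.length = backScan p a p.length := by
      have : p ++ a :: t = p ++ ([a] ++ t) := by simp
      rw [this, ← List.append_assoc, backScan_append _ _ _ _ (by simp)]
      exact backScan_append p [a] a p.length (le_refl _)
    have hstep : solutionStep (d, acc) ((p.length : Int), a)
        = (d.insert a (p.length : Int),
           acc ++ [if backScan (p ++ a :: t) a p.length ≥ 0
                   then (p.length : Int) - backScan (p ++ a :: t) a p.length else -1]) := by
      unfold solutionStep
      by_cases hfound : backScan p a p.length = -1
      · have hnone : d.get? a = none := by rw [hinv a, if_pos hfound]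
        have hcontains : d.contains a = false :=
          (PySem.Dict.get?_eq_none_iff_contains d a).mp hnone
        rw [if_neg (by simp [hcontains])]
        rw [PySem.Dict.setdefault_of_not_contains d _ hcontains]
        have : ¬ backScan (p ++ a :: t) a p.length ≥ 0 := by rw [hbs, hfound]; omega
        simp [this]
      · have hsome : d.get? a = some (backScan p a p.length) := by
          rw [hinv a, if_neg hfound]
        have hcontains : d.contains a = true := by
          rcases h' : d.contains a with _|_
          · rw [(PySem.Dict.get?_eq_none_iff_contains d a).mpr h'] at hsome; cases hsome
          · rfl
        have hge : backScan p a p.length ≥ 0 := (backScan_nonneg_of_found p a p.length hfound).1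
        rw [if_pos (by simp [hcontains])]
        rw [PySem.Dict.getD_of_get?_eq_some d 0 hsome]
        rw [hbs, if_pos hge]
    rw [hstep]
    have hlen : ((p.length : Int) + 1) = (((p ++ [a]).length : Nat) : Int) := by
      simp
    rw [hlen, ih (p ++ [a]) _ _ (LocInv_step hinv a)]
    rw [List.append_assoc p [a] t, List.singleton_append]
    rw [List.length_cons, List.range'_succ, List.map_cons]
    rw [List.append_assoc acc, List.singleton_append]
    congr 2
    · simp only [hc]
    · congr 2
      simp

lemma LocInv_empty : LocInv PySem.Dict.empty [] := by
  intro c; simp [backScan, PySem.Dict.get?_empty]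

-- ===== VERDICT (by name: the statement is the Claim_ definition above) =====
theorem solution_spec : Claim_equal_solution := by
  intro s _
  unfold Spec_solution solution solution_alt
  have h := solution_loop s.toList [] PySem.Dict.empty [] LocInv_empty
  simp only [List.length_nil, Nat.cast_zero, List.nil_append] at h
  rw [h]
  simp [List.range_eq_range']
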